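-- pv_equiv track=rewrite | github.com/yuxin101/skills | skills/adityakamath/ros2-skill/scripts/ros2_tf.py | _build_tree_str
-- ===== SOURCE A (Python) =====
-- def _build_tree_str(children_map, roots, indent="", prefix=""):
--     """Recursively build ASCII tree string from a parent→children map."""
--     lines = []
--     root_list = sorted(roots)
--     for i, root in enumerate(root_list):
--         is_last = (i == len(root_list) - 1)
--         connector = "└── " if is_last else "├── "
--         lines.append(indent + connector + root)
--         child_indent = indent + ("    " if is_last else "│   ")
--         children = sorted(children_map.get(root, []))
--         if children:
--             sub = _build_tree_str(children_map, children, child_indent)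
--             if sub:
--                 lines.append(sub)
--     return "\n".join(lines)
-- ===== SOURCE B (Python) =====
-- def _build_tree_str(children_map, roots, indent="", prefix=""):
--     """Build the ASCII tree by appending flat lines to one shared list and joining once."""
--     lines = []
--
--     def walk(nodes, ind):  # nodes is sorted and non-empty
--         for node in nodes[:-1]:
--             lines.append(ind + "├── " + node)
--             kids = sorted(children_map.get(node, []))
--             if kids:
--                 walk(kids, ind + "│   ")
--         last = nodes[-1]
--         lines.append(ind + "└── " + last)
--         kids = sorted(children_map.get(last, []))
--         if kids:
--             walk(kids, ind + "    ")
--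
--     rs = sorted(roots)
--     if rs:
--         walk(rs, indent)
--     return "\n".join(lines)
-- ===== Notes on version B (the rewrite author's own statement) =====
-- stated objective: simpler
-- what changed: B replaces A's per-level recursion that joins each subtree into a nested string and conditionally re-appends it with a single shared flat list of lines (all-but-last/last loop) appended in one pass and joined exactly once at the end.
import Mathlib
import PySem

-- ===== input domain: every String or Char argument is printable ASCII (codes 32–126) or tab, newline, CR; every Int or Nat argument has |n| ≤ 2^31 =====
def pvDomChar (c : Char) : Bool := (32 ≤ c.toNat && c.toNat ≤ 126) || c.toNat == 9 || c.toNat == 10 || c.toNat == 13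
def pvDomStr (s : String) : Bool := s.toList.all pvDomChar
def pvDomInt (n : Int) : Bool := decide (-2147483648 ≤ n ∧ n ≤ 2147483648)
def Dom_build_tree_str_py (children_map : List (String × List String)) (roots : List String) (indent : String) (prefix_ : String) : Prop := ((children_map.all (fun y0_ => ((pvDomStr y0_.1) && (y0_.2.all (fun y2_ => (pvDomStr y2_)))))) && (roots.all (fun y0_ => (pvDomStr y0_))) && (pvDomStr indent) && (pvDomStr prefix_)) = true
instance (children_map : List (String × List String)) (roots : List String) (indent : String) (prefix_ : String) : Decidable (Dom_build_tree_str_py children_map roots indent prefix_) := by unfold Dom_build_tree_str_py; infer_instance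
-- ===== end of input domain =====

-- B builds one flat list of lines appended in a single pass and joins once, instead of A's
-- per-level nested joins; same output, a simpler decomposition (return-value equality only).

-- ===== PORT A =====
-- A recurses without bound on cyclic maps (Python: RecursionError); the Nat argument of
-- pvBuild is a pure fuel/totality guard, set at the call site to children_map.length + 2,
-- which exceeds the recursion depth on every input admitted by Pre_ (acyclic reachable part).
-- the 'for i, root in enumerate(root_list)' loop of A, carrying i, n = len(root_list), lines;
-- subBuild is the recursive call one level down
def pvALoopF (subBuild : List String → String → String) (m : List (String × List String))
    (ind : String) (n : Nat) : Nat → List String → List String → List String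
  | _, [], lines => lines
  | i, r :: rs, lines =>
    let connector := if i = n - 1 then "└── " else "├── "
    let lines1 := lines ++ [ind ++ connector ++ r]
    let child_indent := ind ++ (if i = n - 1 then "    " else "│   ")
    let children := PySem.List.sorted (PySem.Dict.getD ⟨m⟩ r []) (fun s => s)
    let lines2 :=
      if children = [] then lines1
      else
        let sub := subBuild children child_indent
        if sub = "" then lines1 else lines1 ++ [sub]
    pvALoopF subBuild m ind n (i+1) rs lines2

def pvBuild : Nat → List (String × List String) → List String → String → String
  | 0, _, _, _ => ""   -- fuel exhausted; unreachable under Pre_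
  | f+1, m, roots, ind =>
    let root_list := PySem.List.sorted roots (fun s => s)
    PySem.Str.join "\n"
      (pvALoopF (fun children ci => pvBuild f m children ci) m ind root_list.length 0 root_list [])

def build_tree_str_py (children_map : List (String × List String)) (roots : List String) (indent : String) (prefix_ : String) : String :=
  pvBuild (children_map.length + 2) children_map roots indent

-- ===== PORT B =====
-- B's walk(nodes, ind): all-but-last nodes with '├── ', then the last with '└── ', appending
-- flat lines to the shared accumulator; kid is the recursive call one fuel level down
-- (same fuel guard as A's port, unreachable under Pre_).
def pvBWalkF (kid : List String → String → List String → List String)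
    (m : List (String × List String)) : List String → String → List String → List String
  | [], _, lines => lines
  | [x], ind, lines =>
    let lines1 := lines ++ [ind ++ "└── " ++ x]
    let kids := PySem.List.sorted (PySem.Dict.getD ⟨m⟩ x []) (fun s => s)
    if kids = [] then lines1 else kid kids (ind ++ "    ") lines1
  | x :: y :: ys, ind, lines =>
    let lines1 := lines ++ [ind ++ "├── " ++ x]
    let kids := PySem.List.sorted (PySem.Dict.getD ⟨m⟩ x []) (fun s => s)
    let lines2 := if kids = [] then lines1 else kid kids (ind ++ "│   ") lines1
    pvBWalkF kid m (y :: ys) ind lines2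

def pvBWalk : Nat → List (String × List String) → List String → String → List String → List String
  | 0, _, _, _, lines => lines   -- fuel exhausted; unreachable under Pre_
  | f+1, m, l, ind, lines => pvBWalkF (fun kids ci acc => pvBWalk f m kids ci acc) m l ind lines

def build_tree_str_py_alt (children_map : List (String × List String)) (roots : List String) (indent : String) (prefix_ : String) : String :=
  let rs := PySem.List.sorted roots (fun s => s)
  let lines := if rs = [] then [] else pvBWalk (children_map.length + 2) children_map rs indent []
  PySem.Str.join "\n" lines

-- ===== PRECONDITION & SPEC =====
-- children of a node, per Python's children_map.get(node, [])
def pvKidsOf (m : List (String × List String)) (x : String) : List String :=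
  PySem.Dict.getD ⟨m⟩ x []

-- one step of graph reachability: the set so far plus all its children, deduplicated
def pvReach (m : List (String × List String)) : Nat → List String → List String
  | 0, s => s
  | k+1, s => pvReach m k (PySem.List.dedup (s ++ s.flatMap (fun x => pvKidsOf m x)))

-- Pre_ excludes exactly the inputs on which Python A recurses forever (RecursionError): those
-- where some node reachable from the roots lies on a directed cycle of the children map.
def Pre_build_tree_str_py (children_map : List (String × List String)) (roots : List String) (indent : String) (prefix_ : String) : Prop :=
  ∀ x ∈ pvReach children_map (children_map.length + 1) roots,
    x ∉ pvReach children_map (children_map.length + 1) (pvKidsOf children_map x)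
instance (children_map : List (String × List String)) (roots : List String) (indent : String) (prefix_ : String) : Decidable (Pre_build_tree_str_py children_map roots indent prefix_) := by unfold Pre_build_tree_str_py; infer_instance

def pvWitness_build_tree_str_py : (List (String × List String)) × List String × String × String :=
  ([("a", ["b", "c"]), ("c", ["d"])], ["a"], "", "")

def Spec_build_tree_str_py (children_map : List (String × List String)) (roots : List String) (indent : String) (prefix_ : String) (out : String) : Prop := out = build_tree_str_py_alt children_map roots indent prefix_
instance (children_map : List (String × List String)) (roots : List String) (indent : String) (prefix_ : String) (out : String) : Decidable (Spec_build_tree_str_py children_map roots indent prefix_ out) := by unfold Spec_build_tree_str_py; infer_instance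

-- ===== CLAIM (what is proved, stated in full; the proofs are below) =====
def Claim_equal_build_tree_str_py : Prop := ∀ (children_map : List (String × List String)) (roots : List String) (indent : String) (prefix_ : String), Dom_build_tree_str_py children_map roots indent prefix_ → Pre_build_tree_str_py children_map roots indent prefix_ → Spec_build_tree_str_py children_map roots indent prefix_ (build_tree_str_py children_map roots indent prefix_)

-- ===== LEMMAS AND PROOFS =====

-- a line 'ind ++ conn ++ r' with a non-empty connector is a non-empty string
theorem pv_line_ne (ind conn r : String) (hc : conn ≠ "") : ind ++ conn ++ r ≠ "" := by
  intro h
  have h' : (ind ++ conn ++ r).toList = ("" : String).toList := by rw [h]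
  rw [show ("" : String).toList = [] from rfl] at h'
  simp only [String.toList_append] at h'
  have h2 := (List.append_eq_nil_iff.mp ((List.append_eq_nil_iff.mp h').1)).2
  exact hc (String.toList_inj.mp (h2.trans rfl))

-- join of a singleton
theorem pv_join_one (a : String) : PySem.Str.join "\n" [a] = a := by
  rw [← String.toList_inj]
  simp [PySem.Str.toList_join, PySem.Chars.join_singleton]

-- joining a split list, Chars level
theorem pv_chars_join_append (sep : List Char) (xs ys : List (List Char)) (hx : xs ≠ []) (hy : ys ≠ []) :
    PySem.Chars.join sep (xs ++ ys) = PySem.Chars.join sep xs ++ sep ++ PySem.Chars.join sep ys := by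
  induction xs with
  | nil => exact absurd rfl hx
  | cons x t ih =>
    cases t with
    | nil =>
      cases ys with
      | nil => exact absurd rfl hy
      | cons y ys' =>
        simp only [List.cons_append, List.nil_append, PySem.Chars.join_cons_cons,
          PySem.Chars.join_singleton]
    | cons x2 t2 =>
      have h := ih (by simp)
      simp only [List.cons_append] at h ⊢
      rw [PySem.Chars.join_cons_cons, PySem.Chars.join_cons_cons, h]
      simp [List.append_assoc]

-- joining a split list, String level
theorem pv_join_append (xs ys : List String) (hx : xs ≠ []) (hy : ys ≠ []) :
    PySem.Str.join "\n" (xs ++ ys) = PySem.Str.join "\n" xs ++ "\n" ++ PySem.Str.join "\n" ys := by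
  rw [← String.toList_inj]
  simp only [String.toList_append, PySem.Str.toList_join, List.map_append]
  exact pv_chars_join_append _ _ _ (by simpa using hx) (by simpa using hy)

-- join of a pair
theorem pv_join_pair (a b : String) : PySem.Str.join "\n" [a, b] = a ++ "\n" ++ b := by
  have h := pv_join_append [a] [b] (by simp) (by simp)
  simpa [pv_join_one] using h

-- a join whose first part is a non-empty string is non-empty
theorem pv_join_ne_empty (w : String) (ws : List String) (hw : w ≠ "") :
    PySem.Str.join "\n" (w :: ws) ≠ "" := by
  cases ws with
  | nil => rw [pv_join_one]; exact hw
  | cons y ys =>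
    intro h
    have h' : (PySem.Str.join "\n" (w :: y :: ys)).toList = ("" : String).toList := by rw [h]
    rw [show ("" : String).toList = [] from rfl] at h'
    simp only [PySem.Str.toList_join, List.map_cons, PySem.Chars.join_cons_cons] at h'
    have h3 := (List.append_eq_nil_iff.mp ((List.append_eq_nil_iff.mp h').1)).1
    exact hw (String.toList_inj.mp (h3.trans rfl))

-- the accumulator of A's loop is only appended to
theorem pvALoopF_shift (subBuild : List String → String → String) (m : List (String × List String))
    (ind : String) (n : Nat) :
    ∀ (l : List String) (i : Nat) (a b : List String),
      pvALoopF subBuild m ind n i l (a ++ b) = a ++ pvALoopF subBuild m ind n i l b := by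
  intro l
  induction l with
  | nil => intro i a b; simp [pvALoopF]
  | cons r rs ih =>
    intro i a b
    simp only [pvALoopF]
    split_ifs <;>
      first
        | exact ih (i+1) a _
        | (simp only [List.append_assoc]; exact ih (i+1) a _)

theorem pvALoopF_acc (subBuild : List String → String → String) (m : List (String × List String))
    (ind : String) (n : Nat) (l : List String) (i : Nat) (lines : List String) :
      pvALoopF subBuild m ind n i l lines = lines ++ pvALoopF subBuild m ind n i l [] := by
  have h := pvALoopF_shift subBuild m ind n l i lines []
  simpa using h

-- the accumulator of B's walk is only appended to (kid assumed to only append)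
theorem pvBWalkF_shift (kid : List String → String → List String → List String)
    (m : List (String × List String))
    (hkid : ∀ (k : List String) (ci : String) (a b : List String), kid k ci (a ++ b) = a ++ kid k ci b) :
    ∀ (l : List String) (ind : String) (a b : List String),
      pvBWalkF kid m l ind (a ++ b) = a ++ pvBWalkF kid m l ind b := by
  intro l
  induction l with
  | nil => intro ind a b; simp [pvBWalkF]
  | cons x t iht =>
    cases t with
    | nil =>
      intro ind a b
      simp only [pvBWalkF]
      split_ifs with h
      · simp
      · rw [List.append_assoc]
        exact hkid _ _ a _
    | cons y ys =>
      intro ind a b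
      simp only [pvBWalkF]
      split_ifs with h
      · rw [List.append_assoc]; exact iht ind a _
      · rw [List.append_assoc, hkid _ _ a _]
        exact iht ind a _

theorem pvBWalkF_acc (kid : List String → String → List String → List String)
    (m : List (String × List String))
    (hkid : ∀ (k : List String) (ci : String) (a b : List String), kid k ci (a ++ b) = a ++ kid k ci b)
    (l : List String) (ind : String) (lines : List String) :
      pvBWalkF kid m l ind lines = lines ++ pvBWalkF kid m l ind [] := by
  have h := pvBWalkF_shift kid m hkid l ind lines []
  simpa using h

theorem pvBWalk_shift (m : List (String × List String)) :
    ∀ (f : Nat) (l : List String) (ind : String) (a b : List String),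
      pvBWalk f m l ind (a ++ b) = a ++ pvBWalk f m l ind b := by
  intro f
  induction f with
  | zero => intro l ind a b; simp [pvBWalk]
  | succ f' ih =>
    intro l ind a b
    simp only [pvBWalk]
    exact pvBWalkF_shift _ m (fun k ci a b => ih k ci a b) l ind a b

theorem pvBWalk_acc (f : Nat) (m : List (String × List String))
    (l : List String) (ind : String) (lines : List String) :
      pvBWalk f m l ind lines = lines ++ pvBWalk f m l ind [] := by
  have h := pvBWalk_shift m f l ind lines []
  simpa using h

-- B's walk body on a non-empty list starts with a non-empty line (kid assumed to only append)
theorem pvBWalkF_head (kid : List String → String → List String → List String)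
    (m : List (String × List String))
    (hkid : ∀ (k : List String) (ci : String) (a b : List String), kid k ci (a ++ b) = a ++ kid k ci b)
    (l : List String) (ind : String) (hl : l ≠ []) :
    ∃ w ws, pvBWalkF kid m l ind [] = w :: ws ∧ w ≠ "" := by
  cases l with
  | nil => exact absurd rfl hl
  | cons x t =>
    cases t with
    | nil =>
      simp only [pvBWalkF, List.nil_append]
      split_ifs with h
      · exact ⟨_, _, rfl, pv_line_ne ind "└── " x (by decide)⟩
      · rw [show ([ind ++ "└── " ++ x] : List String) = [ind ++ "└── " ++ x] ++ [] from by simp,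
          hkid, List.singleton_append]
        exact ⟨_, _, rfl, pv_line_ne ind "└── " x (by decide)⟩
    | cons y ys =>
      simp only [pvBWalkF, List.nil_append]
      rw [pvBWalkF_acc kid m hkid (y :: ys) ind]
      split_ifs with h
      · rw [List.singleton_append]
        exact ⟨_, _, rfl, pv_line_ne ind "├── " x (by decide)⟩
      · rw [show ([ind ++ "├── " ++ x] : List String) = [ind ++ "├── " ++ x] ++ [] from by simp,
          hkid, List.append_assoc, List.singleton_append]
        exact ⟨_, _, rfl, pv_line_ne ind "├── " x (by decide)⟩

-- B's walk on a non-empty list starts with a non-empty line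
theorem pvBWalk_head (f : Nat) (m : List (String × List String)) (l : List String) (ind : String)
    (hf : f ≠ 0) (hl : l ≠ []) :
    ∃ w ws, pvBWalk f m l ind [] = w :: ws ∧ w ≠ "" := by
  cases f with
  | zero => exact absurd rfl hf
  | succ f' =>
    simp only [pvBWalk]
    exact pvBWalkF_head _ m (fun k ci a b => pvBWalk_shift m f' k ci a b) l ind hl

-- A's loop on a non-empty list emits at least one chunk
theorem pvALoopF_ne_nil (subBuild : List String → String → String) (m : List (String × List String))
    (ind : String) (n : Nat) (l : List String) (i : Nat) (hl : l ≠ []) :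
    pvALoopF subBuild m ind n i l [] ≠ [] := by
  cases l with
  | nil => exact absurd rfl hl
  | cons r rs =>
    simp only [pvALoopF]
    rw [pvALoopF_acc]
    intro hcontra
    rcases List.append_eq_nil_iff.mp hcontra with ⟨h1, -⟩
    revert h1
    split_ifs <;> (try simp) <;> (try split_ifs) <;> simp

-- one node's chunk: A's [line] / [line, sub] joins like B's flat lines
theorem pv_chunk (f : Nat) (m : List (String × List String)) (line ci : String) (children : List String)
    (hsub : pvBuild f m children ci = PySem.Str.join "\n" (pvBWalk f m children ci []))
    (hzero : children ≠ [] → pvBuild f m children ci = "" → pvBWalk f m children ci [] = []) :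
    PySem.Str.join "\n" (if children = [] then [line]
        else if pvBuild f m children ci = "" then [line] else [line, pvBuild f m children ci]) =
    PySem.Str.join "\n" (if children = [] then [line] else pvBWalk f m children ci [line]) := by
  by_cases hk : children = []
  · simp [hk]
  · rw [if_neg hk, if_neg hk]
    by_cases hs : pvBuild f m children ci = ""
    · rw [if_pos hs, pvBWalk_acc, hzero hk hs]
      simp
    · rw [if_neg hs, pvBWalk_acc]
      have hBl : pvBWalk f m children ci [] ≠ [] := by
        intro hB0
        exact hs (by rw [hsub, hB0]; rfl)
      rw [pv_join_append [line] _ (by simp) hBl, pv_join_pair, pv_join_one, hsub]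

-- the chunk lists are never empty
theorem pv_chunkA_ne (f : Nat) (m : List (String × List String)) (line ci : String) (children : List String) :
    (if children = [] then [line]
      else if pvBuild f m children ci = "" then [line] else [line, pvBuild f m children ci]) ≠ ([] : List String) := by
  split_ifs <;> simp

theorem pv_chunkB_ne (f : Nat) (m : List (String × List String)) (line ci : String) (children : List String) :
    (if children = [] then [line] else pvBWalk f m children ci [line]) ≠ ([] : List String) := by
  split_ifs with h
  · simp
  · rw [pvBWalk_acc]; simp

-- the loop bodies of A and B at one fuel level agree, given that each node's chunk agrees
theorem pv_central_body (f : Nat) (m : List (String × List String))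
    (hchunk : ∀ (r line ci : String),
      PySem.Str.join "\n" (if (PySem.List.sorted (PySem.Dict.getD ⟨m⟩ r []) (fun s => s)) = [] then [line]
          else if pvBuild f m (PySem.List.sorted (PySem.Dict.getD ⟨m⟩ r []) (fun s => s)) ci = "" then [line]
          else [line, pvBuild f m (PySem.List.sorted (PySem.Dict.getD ⟨m⟩ r []) (fun s => s)) ci]) =
      PySem.Str.join "\n" (if (PySem.List.sorted (PySem.Dict.getD ⟨m⟩ r []) (fun s => s)) = [] then [line]
          else pvBWalk f m (PySem.List.sorted (PySem.Dict.getD ⟨m⟩ r []) (fun s => s)) ci [line])) :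
    ∀ (ind : String) (l : List String) (i : Nat),
      PySem.Str.join "\n" (pvALoopF (fun c ci => pvBuild f m c ci) m ind (i + l.length) i l []) =
      PySem.Str.join "\n" (pvBWalkF (fun k ci acc => pvBWalk f m k ci acc) m l ind []) := by
  intro ind l
  induction l with
  | nil => intro i; rfl
  | cons r rs iht =>
    intro i
    cases rs with
    | nil =>
      -- last element of the loop: is_last is true
      simp only [pvALoopF, pvBWalkF, List.length_singleton, Nat.add_sub_cancel, if_true,
        List.nil_append, List.singleton_append]
      exact hchunk r (ind ++ "└── " ++ r) (ind ++ "    ")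
    | cons y ys =>
      -- not the last element: is_last is false
      have hn : i + (r :: y :: ys).length = (i + 1) + (y :: ys).length := by
        simp only [List.length_cons]; omega
      rw [hn]
      have hc' : ¬ (i = (i + 1) + (y :: ys).length - 1) := by
        simp only [List.length_cons]; omega
      have hkidf : ∀ (k : List String) (ci : String) (a b : List String),
          pvBWalk f m k ci (a ++ b) = a ++ pvBWalk f m k ci b :=
        fun k ci a b => pvBWalk_shift m f k ci a b
      rw [pvALoopF.eq_2, pvBWalkF.eq_3]
      simp only [if_neg hc', List.nil_append, List.singleton_append]
      rw [pvALoopF_acc, pvBWalkF_acc _ m hkidf (y :: ys) ind]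
      have hAne := pvALoopF_ne_nil (fun c ci => pvBuild f m c ci) m ind
        ((i + 1) + (y :: ys).length) (y :: ys) (i + 1) (by simp)
      obtain ⟨w, ws, hB, hw⟩ := pvBWalkF_head _ m hkidf (y :: ys) ind (by simp)
      have hBne : pvBWalkF (fun k ci acc => pvBWalk f m k ci acc) m (y :: ys) ind [] ≠ [] := by
        rw [hB]; simp
      have hcAne := pv_chunkA_ne f m (ind ++ "├── " ++ r) (ind ++ "│   ")
        (PySem.List.sorted (PySem.Dict.getD ⟨m⟩ r []) (fun s => s))
      have hcBne := pv_chunkB_ne f m (ind ++ "├── " ++ r) (ind ++ "│   ")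
        (PySem.List.sorted (PySem.Dict.getD ⟨m⟩ r []) (fun s => s))
      rw [pv_join_append _ _ hcAne hAne, pv_join_append _ _ hcBne hBne, iht (i + 1),
        hchunk r (ind ++ "├── " ++ r) (ind ++ "│   ")]

-- central correspondence: A's loop chunks and B's flat lines join to the same string
theorem pv_central (f : Nat) (m : List (String × List String)) :
    ∀ (ind : String) (l : List String) (i : Nat),
      PySem.Str.join "\n" (pvALoopF (fun c ci => pvBuild f m c ci) m ind (i + l.length) i l []) =
      PySem.Str.join "\n" (pvBWalkF (fun k ci acc => pvBWalk f m k ci acc) m l ind []) := by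
  induction f with
  | zero =>
    -- at fuel 0 the child call yields "" on A's side (dropped) and is a no-op on B's side
    exact pv_central_body 0 m (fun r line ci => pv_chunk 0 m line ci _ rfl (fun _ _ => rfl))
  | succ g ih =>
    apply pv_central_body (Nat.succ g) m
    intro r line ci
    have hsub : pvBuild (Nat.succ g) m (PySem.List.sorted (PySem.Dict.getD ⟨m⟩ r []) (fun s => s)) ci =
        PySem.Str.join "\n" (pvBWalk (Nat.succ g) m (PySem.List.sorted (PySem.Dict.getD ⟨m⟩ r []) (fun s => s)) ci []) := by
      simp only [pvBuild, pvBWalk, PySem.List.sorted_sorted]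
      have h := ih ci (PySem.List.sorted (PySem.Dict.getD ⟨m⟩ r []) (fun s => s)) 0
      simpa using h
    apply pv_chunk (Nat.succ g) m line ci _ hsub
    intro hk hs
    exfalso
    obtain ⟨w, ws, hB, hw⟩ := pvBWalk_head (Nat.succ g) m
      (PySem.List.sorted (PySem.Dict.getD ⟨m⟩ r []) (fun s => s)) ci (Nat.succ_ne_zero g) hk
    exact pv_join_ne_empty w ws hw (by rw [← hB, ← hsub]; exact hs)

-- ===== VERDICT (by name: the statement is the Claim_ definition above) =====
theorem build_tree_str_py_spec : Claim_equal_build_tree_str_py := by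
  intro cm roots ind pre _ _
  unfold Spec_build_tree_str_py build_tree_str_py build_tree_str_py_alt
  show pvBuild (Nat.succ (cm.length + 1)) cm roots ind =
    PySem.Str.join "\n" (if PySem.List.sorted roots (fun s => s) = [] then []
      else pvBWalk (Nat.succ (cm.length + 1)) cm (PySem.List.sorted roots (fun s => s)) ind [])
  by_cases h : PySem.List.sorted roots (fun s => s) = []
  · rw [if_pos h]
    simp only [pvBuild, h]
    rfl
  · rw [if_neg h]
    simp only [pvBuild, pvBWalk]
    have hc := pv_central (cm.length + 1) cm ind (PySem.List.sorted roots (fun s => s)) 0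
    simp only [Nat.zero_add] at hc
    exact hc
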